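-- pv_equiv track=rewrite | github.com/rushimaniar/ASS | rules.py | _countVehicles
-- ===== SOURCE A (Python) =====
-- def _countVehicles(y_result):
--     # Count vehicles, if it finds illegal vehicles straight return false.
--     #
--     # Ladders are more readable than combined logic. Change my mind.
--     count = 0
--     for result in y_result:
--         if result[0] == 'truck':
--             return False
--         if result[0] == 'bus':
--             return False
--         if result[0] == 'train':
--             return False
--
--         # The legal vehicles
--         if result[0] == 'car':
--             count += 1
--         if result[0] == 'bicycle':
--             count += 1
--         if result[0] == 'motorbike':
--             count += 1
--     return count
-- ===== SOURCE B (Python) =====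
-- def _countVehicles(y_result):
--     # Two sequential passes: reject if any illegal label appears, else count legal ones.
--     if any(r[0] in ('truck', 'bus', 'train') for r in y_result):
--         return False
--     return sum(1 for r in y_result if r[0] in ('car', 'bicycle', 'motorbike'))
-- ===== Notes on version B (the rewrite author's own statement) =====
-- stated objective: simpler
-- what changed: Replaces the single accumulating loop with early returns by two sequential passes: an any() scan for illegal labels followed by a sum() over legal labels, discarding the accumulator A threads through; on illegal-label inputs B returns the very same Python value False as A (those inputs sit outside Pre_ only because False is a bool, not an int, so the Int-typed ports cannot express it).
-- outside the precondition, e.g. on _countVehicles([['truck'], ['car']]): A returns False, B returns False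
import Mathlib
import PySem

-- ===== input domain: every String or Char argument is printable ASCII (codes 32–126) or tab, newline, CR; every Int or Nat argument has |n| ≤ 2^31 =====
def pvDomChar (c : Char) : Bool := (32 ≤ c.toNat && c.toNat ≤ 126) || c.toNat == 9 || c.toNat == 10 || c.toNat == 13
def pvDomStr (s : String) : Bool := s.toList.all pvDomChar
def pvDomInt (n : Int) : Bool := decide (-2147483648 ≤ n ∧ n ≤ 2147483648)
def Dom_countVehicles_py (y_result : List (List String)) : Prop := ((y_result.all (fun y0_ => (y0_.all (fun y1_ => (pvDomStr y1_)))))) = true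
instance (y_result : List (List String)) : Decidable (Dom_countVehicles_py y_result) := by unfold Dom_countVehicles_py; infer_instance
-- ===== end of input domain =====

-- B replaces A's single accumulating loop (with early returns) by two sequential passes:
-- an any-scan for illegal labels, then a count of legal labels. Objective: simpler; same O(n) cost.
-- Python's False is the int 0 (bool is an int subtype), so 'return False' is ported as 0.

-- ===== PORT A =====
-- loop of A: count accumulator threaded; 'return False' on an illegal label is the int 0;
-- r[0] on an empty r is an IndexError (pyGet? = none; excluded by Pre_).
def countVehiclesGo : List (List String) → Int → Int
  | [], count => count
  | result :: rest, count =>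
    match PySem.List.pyGet? result 0 with
    | none => 0  -- IndexError, outside Pre_
    | some h =>
      if h == "truck" then 0        -- return False (= int 0)
      else if h == "bus" then 0     -- return False (= int 0)
      else if h == "train" then 0   -- return False (= int 0)
      else
        let count := if h == "car" then count + 1 else count
        let count := if h == "bicycle" then count + 1 else count
        let count := if h == "motorbike" then count + 1 else count
        countVehiclesGo rest count

def countVehicles_py (y_result : List (List String)) : Int :=
  countVehiclesGo y_result 0

-- ===== PORT B =====
def countVehicles_py_alt (y_result : List (List String)) : Int :=
  if y_result.any (fun r => ["truck", "bus", "train"].contains ((PySem.List.pyGet? r 0).getD "")) then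
    0  -- return False (= int 0)
  else
    (y_result.countP (fun r => ["car", "bicycle", "motorbike"].contains ((PySem.List.pyGet? r 0).getD "")) : Int)

-- ===== PRECONDITION & SPEC =====
-- Pre_ excludes (a) inputs with an empty inner list, where A and B both raise IndexError, and
-- (b) inputs containing an illegal label 'truck'/'bus'/'train', where A and B both return the
-- Python bool False — identical behaviour, excluded only because False is not a value of the
-- declared return type int and so cannot be the typed ports' output.
def Pre_countVehicles_py (y_result : List (List String)) : Prop :=
  ∀ r ∈ y_result, r ≠ [] ∧ r.headD "" ≠ "truck" ∧ r.headD "" ≠ "bus" ∧ r.headD "" ≠ "train"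
instance (y_result : List (List String)) : Decidable (Pre_countVehicles_py y_result) := by
  unfold Pre_countVehicles_py; infer_instance

def pvWitness_countVehicles_py : List (List String) := [["car", "0.9"], ["dog"], ["motorbike"]]

def Spec_countVehicles_py (y_result : List (List String)) (out : Int) : Prop := out = countVehicles_py_alt y_result
instance (y_result : List (List String)) (out : Int) : Decidable (Spec_countVehicles_py y_result out) := by unfold Spec_countVehicles_py; infer_instance

-- ===== CLAIM (what is proved, stated in full; the proofs are below) =====
def Claim_equal_countVehicles_py : Prop := ∀ (y_result : List (List String)), Dom_countVehicles_py y_result → Pre_countVehicles_py y_result → Spec_countVehicles_py y_result (countVehicles_py y_result)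

-- ===== LEMMAS AND PROOFS =====

def illP (r : List String) : Bool := ["truck", "bus", "train"].contains ((PySem.List.pyGet? r 0).getD "")
def legP (r : List String) : Bool := ["car", "bicycle", "motorbike"].contains ((PySem.List.pyGet? r 0).getD "")

lemma countVehiclesGo_leg (l : List (List String)) (c : Int)
    (h : ∀ r ∈ l, r ≠ []) (hi : l.any illP = false) :
    countVehiclesGo l c = c + (l.countP legP : Int) := by
  induction l generalizing c with
  | nil => simp [countVehiclesGo]
  | cons r rest ih =>
    have hne : r ≠ [] := h r (List.mem_cons_self ..)
    have hpre : ∀ x ∈ rest, x ≠ [] := fun x hx => h x (List.mem_cons_of_mem _ hx)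
    obtain ⟨a, rs, rfl⟩ := List.exists_cons_of_ne_nil hne
    simp only [List.any_cons, Bool.or_eq_false_iff] at hi
    obtain ⟨hhd, hrest⟩ := hi
    have hill : ¬ (a = "truck" ∨ a = "bus" ∨ a = "train") := by
      simpa [illP, PySem.List.pyGet?_zero_cons] using hhd
    have ht : ¬ a = "truck" := fun e => hill (Or.inl e)
    have hb : ¬ a = "bus" := fun e => hill (Or.inr (Or.inl e))
    have htr : ¬ a = "train" := fun e => hill (Or.inr (Or.inr e))
    simp only [countVehiclesGo, PySem.List.pyGet?_zero_cons, beq_iff_eq, ht, hb, htr, if_false,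
      ih _ hpre hrest, List.countP_cons]
    simp only [legP, PySem.List.pyGet?_zero_cons, Option.getD_some, List.contains_eq_mem,
      List.mem_cons, List.not_mem_nil, or_false, decide_eq_true_eq]
    by_cases h1 : a = "car" <;> by_cases h2 : a = "bicycle" <;> by_cases h3 : a = "motorbike" <;>
      simp_all <;> ring

-- ===== VERDICT (by name: the statement is the Claim_ definition above) =====
theorem countVehicles_py_spec : Claim_equal_countVehicles_py := by
  intro y _ hpre
  unfold Spec_countVehicles_py countVehicles_py countVehicles_py_alt
  have hnil : ∀ r ∈ y, r ≠ [] := fun r hr => (hpre r hr).1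
  have hany : (y.any fun r => ["truck", "bus", "train"].contains ((PySem.List.pyGet? r 0).getD "")) = false := by
    simp only [List.any_eq_false]
    intro r hr
    obtain ⟨hne, ht, hb, htr⟩ := hpre r hr
    obtain ⟨a, rs, rfl⟩ := List.exists_cons_of_ne_nil hne
    simp only [List.headD_cons] at ht hb htr
    simp [PySem.List.pyGet?_zero_cons, ht, hb, htr]
  rw [if_neg (by rw [hany]; simp), countVehiclesGo_leg y 0 hnil (by exact hany)]
  rw [show legP = (fun r => ["car", "bicycle", "motorbike"].contains ((PySem.List.pyGet? r 0).getD "")) from rfl]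
  omega
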